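-- pv_equiv track=rewrite | github.com/pypi-data/pypi-mirror-228 | packages/robingame/robingame-2.0.0.tar.gz/robingame-2.0.0/robingame/utils.py | count_edges
-- ===== SOURCE A (Python) =====
-- def count_edges(values) -> tuple[int, int]:
--     rising_edges = 0
--     falling_edges = 0
--     for ii, value in enumerate(values):
--         if ii == 0:
--             previous_value = value
--         if value and not previous_value:
--             rising_edges += 1
--         if not value and previous_value:
--             falling_edges += 1
--         previous_value = value
--     return rising_edges, falling_edges
-- ===== SOURCE B (Python) =====
-- from itertools import groupby
--
-- def count_edges(values) -> tuple[int, int]: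
--     rising_edges = 0
--     falling_edges = 0
--     first = True
--     previous_key = False
--     for key, _group in groupby(values, key=bool):
--         if not first:
--             if key and not previous_key:
--                 rising_edges += 1
--             if not key and previous_key:
--                 falling_edges += 1
--         first = False
--         previous_key = key
--     return rising_edges, falling_edges
-- ===== Notes on version B (the rewrite author's own statement) =====
-- stated objective: alternative
-- what changed: B first collapses the input into maximal runs of uniform truthiness with itertools.groupby and then counts boundaries between consecutive run keys, instead of A's element-by-element scan comparing every adjacent pair.
import Mathlib
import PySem

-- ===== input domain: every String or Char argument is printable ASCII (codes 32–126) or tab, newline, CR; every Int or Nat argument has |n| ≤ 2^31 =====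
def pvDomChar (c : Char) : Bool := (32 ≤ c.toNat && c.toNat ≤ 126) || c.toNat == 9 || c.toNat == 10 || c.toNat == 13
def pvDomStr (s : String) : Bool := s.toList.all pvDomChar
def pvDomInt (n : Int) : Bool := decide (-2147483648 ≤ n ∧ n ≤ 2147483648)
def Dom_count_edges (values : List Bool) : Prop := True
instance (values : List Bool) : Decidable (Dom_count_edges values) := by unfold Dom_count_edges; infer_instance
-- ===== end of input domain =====

-- B collapses the input into maximal runs of uniform truthiness and counts run boundaries; alternative decomposition, same complexity.
-- ===== PORT A =====
-- A's loop: state (rising, falling, previous); 'ii == 0: previous_value = value' is modelled by Option with getD.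
def count_edges (values : List Bool) : Int × Int :=
  let st := values.foldl (fun (st : Int × Int × Option Bool) value =>
    let r := st.1
    let f := st.2.1
    let previous := st.2.2.getD value
    let r := if value && !previous then r + 1 else r
    let f := if !value && previous then f + 1 else f
    (r, f, some value)) (0, 0, none)
  (st.1, st.2.1)

-- ===== PORT B =====
-- groupby(values, key=bool): the list of run keys = values with adjacent duplicates removed.
def runKeys : List Bool → List Bool
  | [] => []
  | [v] => [v]
  | v :: w :: rest => if v == w then runKeys (w :: rest) else v :: runKeys (w :: rest)

def count_edges_alt (values : List Bool) : Int × Int :=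
  let st := (runKeys values).foldl
    (fun (st : Int × Int × Bool × Bool) key =>
      let r := st.1
      let f := st.2.1
      let first := st.2.2.1
      let prev := st.2.2.2
      let r := if !first && (key && !prev) then r + 1 else r
      let f := if !first && (!key && prev) then f + 1 else f
      (r, f, false, key)) (0, 0, true, false)
  (st.1, st.2.1)

-- ===== PRECONDITION & SPEC =====
def Spec_count_edges (values : List Bool) (out : Int × Int) : Prop := out = count_edges_alt values
instance (values : List Bool) (out : Int × Int) : Decidable (Spec_count_edges values out) := by unfold Spec_count_edges; infer_instance

-- ===== CLAIM (what is proved, stated in full; the proofs are below) =====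
def Claim_equal_count_edges : Prop := ∀ (values : List Bool), Dom_count_edges values → Spec_count_edges values (count_edges values)

-- ===== LEMMAS AND PROOFS =====

-- ===== VERDICT (by name: the statement is the Claim_ definition above) =====
-- step function shared shape: after the first element both folds advance (r, f, prev) identically
def step (st : Int × Int × Bool) (key : Bool) : Int × Int × Bool :=
  ((if key && !st.2.2 then st.1 + 1 else st.1),
   (if !key && st.2.2 then st.2.1 + 1 else st.2.1), key)

-- keys of the runs of xs when the element before xs had truthiness prev
def tailKeys (prev : Bool) : List Bool → List Bool
  | [] => []
  | x :: rest => if x == prev then tailKeys prev rest else x :: tailKeys x rest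

theorem runKeys_cons (v : Bool) (rest : List Bool) :
    runKeys (v :: rest) = v :: tailKeys v rest := by
  induction rest generalizing v with
  | nil => simp [runKeys, tailKeys]
  | cons w rest ih =>
    by_cases h : v = w
    · simp [runKeys, tailKeys, h, ih]
    · have h' : ¬w = v := fun e => h e.symm
      simp [runKeys, tailKeys, h, h', ih]

theorem foldA_some (xs : List Bool) (r f : Int) (prev : Bool) :
    xs.foldl (fun (st : Int × Int × Option Bool) value =>
      let r := st.1
      let f := st.2.1
      let previous := st.2.2.getD value
      let r := if value && !previous then r + 1 else r
      let f := if !value && previous then f + 1 else f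
      (r, f, some value)) (r, f, some prev)
    = ((xs.foldl step (r, f, prev)).1, (xs.foldl step (r, f, prev)).2.1,
       some (xs.foldl step (r, f, prev)).2.2) := by
  induction xs generalizing r f prev with
  | nil => rfl
  | cons x xs ih =>
    rw [List.foldl_cons, List.foldl_cons]
    exact ih _ _ _

theorem foldB_notfirst (ks : List Bool) (r f : Int) (prev : Bool) :
    ks.foldl (fun (st : Int × Int × Bool × Bool) key =>
      let r := st.1
      let f := st.2.1
      let first := st.2.2.1
      let prev := st.2.2.2
      let r := if !first && (key && !prev) then r + 1 else r
      let f := if !first && (!key && prev) then f + 1 else f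
      (r, f, false, key)) (r, f, false, prev)
    = ((ks.foldl step (r, f, prev)).1, (ks.foldl step (r, f, prev)).2.1, false,
       (ks.foldl step (r, f, prev)).2.2) := by
  induction ks generalizing r f prev with
  | nil => rfl
  | cons k ks ih =>
    rw [List.foldl_cons, List.foldl_cons]
    exact ih _ _ _

theorem fold_step_tailKeys (xs : List Bool) (r f : Int) (prev : Bool) :
    xs.foldl step (r, f, prev) = (tailKeys prev xs).foldl step (r, f, prev) := by
  induction xs generalizing r f prev with
  | nil => rfl
  | cons x xs ih =>
    by_cases h : x = prev
    · subst h
      simp [List.foldl, step, tailKeys, ih]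
    · have hx : (x == prev) = false := by simp [h]
      simp [List.foldl, step, tailKeys, hx, ih]

-- ===== VERDICT (by name: the statement is the Claim_ definition above) =====
theorem count_edges_spec : Claim_equal_count_edges := by
  intro values _
  unfold Spec_count_edges count_edges count_edges_alt
  cases values with
  | nil => rfl
  | cons v rest =>
    rw [runKeys_cons]
    simp only [List.foldl]
    have h1 : (if v && !(Option.getD (none : Option Bool) v) then (0:Int) + 1 else 0) = 0 := by
      cases v <;> simp
    have h2 : (if !v && Option.getD (none : Option Bool) v then (0:Int) + 1 else 0) = 0 := by
      cases v <;> simp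
    rw [foldA_some, foldB_notfirst, fold_step_tailKeys]
    cases v <;> simp
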